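-- pv_equiv track=rewrite | github.com/dev-hang/Programmers-Algorithm | level2/kakao_friends_coloring_book.py | kakao_friends_coloring_book
-- ===== SOURCE A (Python) =====
-- from collections import deque
--
-- def kakao_friends_coloring_book(m, n, picture):
--     answer = [0, 0]
--     visited = [[False] * n for _ in range(m)]
--     result = []
--
--     def bfs(x, y):
--         dx, dy = [0, 1, 0, -1], [1, 0, -1, 0]
--         cnt = 1
--         q = deque()
--         q.append([x, y])
--         visited[x][y] = True
--
--         while q:
--             a, b = q.popleft()
--             for d in range(4):
--                 na = a + dx[d]
--                 nb = b + dy[d]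
--
--                 if 0 <= na < m and 0 <= nb < n:
--                     if not visited[na][nb] and picture[a][b] == picture[na][nb]:
--                         visited[na][nb] = True
--                         q.append([na, nb])
--                         cnt += 1
--
--         result.append(cnt)
--
--     for i in range(m):
--         for j in range(n):
--             if picture[i][j] and not visited[i][j]:
--                 bfs(i, j)
--
--     answer[0] = len(result)
--     answer[1] = max(result)
--
--     return answer
-- ===== SOURCE B (Python) =====
-- def kakao_friends_coloring_book(m, n, picture):
--     deltas = ((0, 1), (1, 0), (0, -1), (-1, 0))
--     done = set()
--     sizes = []
--     for i in range(m):
--         for j in range(n):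
--             if picture[i][j] and (i, j) not in done:
--                 color = picture[i][j]
--                 comp = {(i, j)}
--                 # saturate: after m*n rounds the component is complete
--                 for _ in range(m * n):
--                     comp = comp | {(a + da, b + db)
--                                    for (a, b) in comp
--                                    for (da, db) in deltas
--                                    if 0 <= a + da < m and 0 <= b + db < n
--                                    and picture[a + da][b + db] == color}
--                 done |= comp
--                 sizes.append(len(comp))
--     return [len(sizes), max(sizes)]
-- ===== Notes on version B (the rewrite author's own statement) =====
-- stated objective: alternative
-- what changed: Replaces the deque-BFS with visited matrix by a set-saturation flood fill: each component is computed as the fixpoint of repeatedly unioning in same-color in-bounds neighbours of the current cell set, with a 'done' set instead of a visited matrix.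
import Mathlib
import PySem

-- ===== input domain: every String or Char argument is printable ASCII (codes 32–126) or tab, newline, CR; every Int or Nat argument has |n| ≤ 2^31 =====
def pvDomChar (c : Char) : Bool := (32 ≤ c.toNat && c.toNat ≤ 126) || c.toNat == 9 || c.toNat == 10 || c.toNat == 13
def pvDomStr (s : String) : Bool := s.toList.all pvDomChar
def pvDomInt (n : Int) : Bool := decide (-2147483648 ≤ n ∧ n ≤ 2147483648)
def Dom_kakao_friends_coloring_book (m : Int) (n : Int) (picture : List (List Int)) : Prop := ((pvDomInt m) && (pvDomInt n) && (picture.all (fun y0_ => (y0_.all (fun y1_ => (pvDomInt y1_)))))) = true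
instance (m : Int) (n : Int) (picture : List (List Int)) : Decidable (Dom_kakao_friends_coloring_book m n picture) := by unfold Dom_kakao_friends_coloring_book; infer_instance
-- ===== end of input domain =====

-- B replaces A's deque-BFS over a visited matrix by a set-saturation flood fill (alternative algorithm, not faster);
-- the equivalence is about the return value on inputs where A returns (Pre_ excludes A's IndexError / max([]) ValueError).

-- ===== PORT A =====
-- shared cell accessor: picture[a][b] (callers only use it with 0 <= a < m, 0 <= b < n; in range under Pre_)
def picAt (picture : List (List Int)) (a b : Int) : Int := (picture.getD a.toNat []).getD b.toNat 0

def visAt (v : List (List Bool)) (a b : Int) : Bool := (v.getD a.toNat []).getD b.toNat true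

def setVis (v : List (List Bool)) (a b : Int) : List (List Bool) :=
  v.set a.toNat ((v.getD a.toNat []).set b.toNat true)

def countFalse (v : List (List Bool)) : Nat := (v.map (fun r => r.countP (fun x => !x))).sum

-- one direction d of A's inner 'for d in range(4)' loop; state = (visited, queue, cnt)
def bfsStep (m n : Int) (picture : List (List Int)) (a b : Int)
    (st : List (List Bool) × List (Int × Int) × Int) (d : Int) :
    List (List Bool) × List (Int × Int) × Int :=
  let na := a + PySem.List.pyGetD [0, 1, 0, -1] d 0
  let nb := b + PySem.List.pyGetD [1, 0, -1, 0] d 0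
  if 0 ≤ na ∧ na < m ∧ 0 ≤ nb ∧ nb < n then
    if visAt st.1 na nb = false ∧ picAt picture a b = picAt picture na nb then
      (setVis st.1 na nb, st.2.1 ++ [(na, nb)], st.2.2 + 1)
    else st
  else st

theorem countP_set_true (row : List Bool) :
    ∀ (j : Nat), row[j]? = some false →
      (row.set j true).countP (fun x => !x) + 1 = row.countP (fun x => !x) := by
  induction row with
  | nil => intro j h; simp at h
  | cons r rows ih =>
    intro j h
    cases j with
    | zero =>
      simp at h
      subst h
      simp [List.set]
    | succ j =>
      simp at h
      have := ih j h
      simp [List.countP_cons]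
      omega

theorem countFalse_set (v : List (List Bool)) :
    ∀ (i : Nat) (row r' : List Bool), v[i]? = some row →
      countFalse (v.set i r') + row.countP (fun x => !x) =
        countFalse v + r'.countP (fun x => !x) := by
  induction v with
  | nil => intro i row r' h; simp at h
  | cons hd tl ih =>
    intro i row r' h
    cases i with
    | zero => simp at h; subst h; simp [countFalse]; omega
    | succ i =>
      simp at h
      have := ih i row r' h
      simp [countFalse] at this ⊢
      omega

theorem countFalse_setVis {v : List (List Bool)} {a b : Int}
    (h : visAt v a b = false) : countFalse (setVis v a b) + 1 = countFalse v := by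
  unfold visAt at h
  cases hv : v[a.toNat]? with
  | none =>
    have hgd : v.getD a.toNat [] = [] := by rw [List.getD_eq_getElem?_getD, hv]; rfl
    rw [hgd] at h; simp [List.getD] at h
  | some row =>
    have hgd : v.getD a.toNat [] = row := by rw [List.getD_eq_getElem?_getD, hv]; rfl
    rw [hgd] at h
    rw [List.getD_eq_getElem?_getD] at h
    cases hr : row[b.toNat]? with
    | none => rw [hr] at h; simp at h
    | some x =>
      rw [hr] at h
      simp only [Option.getD_some] at h
      subst h
      have h1 := countP_set_true row b.toNat hr
      have h2 := countFalse_set v a.toNat row (row.set b.toNat true) hv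
      unfold setVis
      rw [hgd]
      omega

theorem bfsStep_measure (m n : Int) (picture : List (List Int)) (a b : Int)
    (st : List (List Bool) × List (Int × Int) × Int) (d : Int) :
    5 * countFalse (bfsStep m n picture a b st d).1 + (bfsStep m n picture a b st d).2.1.length ≤
      5 * countFalse st.1 + st.2.1.length := by
  simp only [bfsStep]
  split_ifs with h1 h2
  · have := countFalse_setVis h2.1
    simp only [List.length_append, List.length_cons, List.length_nil]
    omega
  · exact le_refl _
  · exact le_refl _

theorem bfsFold_measure (m n : Int) (picture : List (List Int)) (a b : Int)
    (ds : List Int) (st : List (List Bool) × List (Int × Int) × Int) :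
    5 * countFalse (ds.foldl (bfsStep m n picture a b) st).1 +
        (ds.foldl (bfsStep m n picture a b) st).2.1.length ≤
      5 * countFalse st.1 + st.2.1.length := by
  induction ds generalizing st with
  | nil => exact le_refl _
  | cons d ds ih =>
    rw [List.foldl_cons]
    exact le_trans (ih _) (bfsStep_measure m n picture a b st d)

-- A's 'while q' BFS loop
def bfsLoop (m n : Int) (picture : List (List Int)) (v : List (List Bool))
    (q : List (Int × Int)) (cnt : Int) : List (List Bool) × Int :=
  match q with
  | [] => (v, cnt)
  | (a, b) :: rest =>
    let s := (PySem.List.pyRange 0 4 1).foldl (bfsStep m n picture a b) (v, rest, cnt)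
    bfsLoop m n picture s.1 s.2.1 s.2.2
termination_by 5 * countFalse v + q.length
decreasing_by
  have h := bfsFold_measure m n picture a b (PySem.List.pyRange 0 4 1) (v, rest, cnt)
  simp only [List.length_cons] at h ⊢
  omega

def kakao_friends_coloring_book (m : Int) (n : Int) (picture : List (List Int)) : List Int :=
  let visited0 := List.replicate m.toNat (List.replicate n.toNat false)
  let st := (PySem.List.pyRange 0 m 1).foldl (fun st i =>
    (PySem.List.pyRange 0 n 1).foldl (fun st j =>
      if picAt picture i j ≠ 0 ∧ visAt st.1 i j = false then
        let r := bfsLoop m n picture (setVis st.1 i j) [(i, j)] 1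
        (r.1, st.2 ++ [r.2])
      else st) st) (visited0, ([] : List Int))
  [(st.2.length : Int), (PySem.List.max? st.2 (fun x => x)).getD 0]

-- ===== PORT B =====
def deltasB : List (Int × Int) := [(0, 1), (1, 0), (0, -1), (-1, 0)]

-- comp | {(a+da, b+db) for (a,b) in comp for (da,db) in deltas if in-bounds and picture[a+da][b+db] == color}
def expandOnce (m n : Int) (picture : List (List Int)) (c0 : Int)
    (comp : PySem.Set (Int × Int)) : PySem.Set (Int × Int) :=
  comp.foldl (fun acc c =>
    deltasB.foldl (fun acc dl =>
      if (0 ≤ c.1 + dl.1 ∧ c.1 + dl.1 < m ∧ 0 ≤ c.2 + dl.2 ∧ c.2 + dl.2 < n) ∧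
          picAt picture (c.1 + dl.1) (c.2 + dl.2) = c0 then
        PySem.Set.add acc (c.1 + dl.1, c.2 + dl.2)
      else acc) acc) comp

def kakao_friends_coloring_book_alt (m : Int) (n : Int) (picture : List (List Int)) : List Int :=
  let st := (PySem.List.pyRange 0 m 1).foldl (fun st i =>
    (PySem.List.pyRange 0 n 1).foldl (fun st j =>
      if picAt picture i j ≠ 0 ∧ (i, j) ∉ st.1 then
        let c0 := picAt picture i j
        let comp := (PySem.List.pyRange 0 (m * n) 1).foldl
          (fun comp _ => expandOnce m n picture c0 comp) (PySem.Set.ofList [(i, j)])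
        (PySem.Set.union st.1 comp, st.2 ++ [PySem.Set.len comp])
      else st) st) ((PySem.Set.empty : PySem.Set (Int × Int)), ([] : List Int))
  [(st.2.length : Int), (PySem.List.max? st.2 (fun x => x)).getD 0]

-- ===== PRECONDITION & SPEC =====
-- Pre_ excludes exactly the inputs on which the Python A raises: grids where some scanned access
-- picture[i][j] (i < m, j < n) is out of range (IndexError), and grids with no nonzero scanned cell,
-- where A computes max([]) (ValueError).  On every other input A returns normally.
def Pre_kakao_friends_coloring_book (m : Int) (n : Int) (picture : List (List Int)) : Prop :=
  (0 < n → m.toNat ≤ picture.length) ∧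
  (∀ row ∈ picture.take m.toNat, n.toNat ≤ row.length) ∧
  (picture.take m.toNat).any (fun row => (row.take n.toNat).any (fun x => x ≠ 0)) = true

instance (m : Int) (n : Int) (picture : List (List Int)) : Decidable (Pre_kakao_friends_coloring_book m n picture) := by
  unfold Pre_kakao_friends_coloring_book; infer_instance

def pvWitness_kakao_friends_coloring_book : Int × Int × List (List Int) := (2, 2, [[1, 1], [0, 2]])

def Spec_kakao_friends_coloring_book (m : Int) (n : Int) (picture : List (List Int)) (out : List Int) : Prop := out = kakao_friends_coloring_book_alt m n picture
instance (m : Int) (n : Int) (picture : List (List Int)) (out : List Int) : Decidable (Spec_kakao_friends_coloring_book m n picture out) := by unfold Spec_kakao_friends_coloring_book; infer_instance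

-- ===== CLAIM (what is proved, stated in full; the proofs are below) =====
def Claim_equal_kakao_friends_coloring_book : Prop := ∀ (m : Int) (n : Int) (picture : List (List Int)), Dom_kakao_friends_coloring_book m n picture → Pre_kakao_friends_coloring_book m n picture → Spec_kakao_friends_coloring_book m n picture (kakao_friends_coloring_book m n picture)

-- ===== LEMMAS AND PROOFS =====

-- the graph both programs explore: in-bounds orthogonally adjacent cells of equal colour
def InB (m n : Int) (c : Int × Int) : Prop := 0 ≤ c.1 ∧ c.1 < m ∧ 0 ≤ c.2 ∧ c.2 < n

def StepR (m n : Int) (pic : List (List Int)) (c d : Int × Int) : Prop :=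
  InB m n c ∧ InB m n d ∧ picAt pic c.1 c.2 = picAt pic d.1 d.2 ∧
    (d = (c.1, c.2 + 1) ∨ d = (c.1 + 1, c.2) ∨ d = (c.1, c.2 - 1) ∨ d = (c.1 - 1, c.2))

def Reach (m n : Int) (pic : List (List Int)) (s c : Int × Int) : Prop :=
  Relation.ReflTransGen (StepR m n pic) s c

def GoodShape (m n : Int) (v : List (List Bool)) : Prop :=
  v.length = m.toNat ∧ ∀ r ∈ v, r.length = n.toNat

theorem stepR_symm {m n : Int} {pic : List (List Int)} {c d : Int × Int}
    (h : StepR m n pic c d) : StepR m n pic d c := by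
  obtain ⟨hc, hd, hcol, hdel⟩ := h
  refine ⟨hd, hc, hcol.symm, ?_⟩
  obtain ⟨cx, cy⟩ := c
  rcases hdel with h | h | h | h <;> subst h <;> simp

theorem reach_symm {m n : Int} {pic : List (List Int)} {s c : Int × Int}
    (h : Reach m n pic s c) : Reach m n pic c s := by
  exact (Relation.ReflTransGen.symmetric (fun _ _ hs => stepR_symm hs)) h

theorem reach_inB {m n : Int} {pic : List (List Int)} {s c : Int × Int}
    (hs : InB m n s) (h : Reach m n pic s c) : InB m n c := by
  induction h with
  | refl => exact hs
  | tail _ hstep _ => exact hstep.2.1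

theorem reach_color {m n : Int} {pic : List (List Int)} {s c : Int × Int}
    (h : Reach m n pic s c) : picAt pic s.1 s.2 = picAt pic c.1 c.2 := by
  induction h with
  | refl => rfl
  | tail _ hstep ih => exact ih.trans hstep.2.2.1

theorem visAt_setVis_self {m n : Int} {v : List (List Bool)} {a b : Int}
    (hsh : GoodShape m n v) (hb : InB m n (a, b)) : visAt (setVis v a b) a b = true := by
  obtain ⟨hsl, hrow⟩ := hsh
  obtain ⟨ha0, ham, hb0, hbn⟩ := hb
  have hai : a.toNat < v.length := by omega
  have hv : v[a.toNat]? = some v[a.toNat] := List.getElem?_eq_getElem hai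
  have hrw : v.getD a.toNat [] = v[a.toNat] := by rw [List.getD_eq_getElem?_getD, hv]; rfl
  have hbl : b.toNat < (v.getD a.toNat []).length := by
    rw [hrw, hrow _ (List.getElem_mem hai)]; omega
  unfold visAt setVis
  simp only [List.getD_eq_getElem?_getD] at hbl ⊢
  rw [List.getElem?_set_self hai]
  simp only [Option.getD_some]
  rw [List.getElem?_set_self hbl]
  rfl

theorem visAt_setVis_other {v : List (List Bool)} {a b c d : Int}
    (hne : ¬(c.toNat = a.toNat ∧ d.toNat = b.toNat)) :
    visAt (setVis v a b) c d = visAt v c d := by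
  unfold visAt setVis
  simp only [List.getD_eq_getElem?_getD]
  by_cases hca : c.toNat = a.toNat
  · have hdb : d.toNat ≠ b.toNat := fun h => hne ⟨hca, h⟩
    rw [hca]
    by_cases hlt : a.toNat < v.length
    · rw [List.getElem?_set_self hlt]
      simp only [Option.getD_some]
      rw [List.getElem?_set_ne (Ne.symm hdb)]
    · rw [List.set_eq_of_length_le (by omega)]
  · rw [List.getElem?_set_ne (Ne.symm hca)]

theorem visAt_setVis_mono {v : List (List Bool)} {a b c d : Int}
    (h : visAt v c d = true) : visAt (setVis v a b) c d = true := by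
  by_cases hne : c.toNat = a.toNat ∧ d.toNat = b.toNat
  · obtain ⟨hca, hdb⟩ := hne
    unfold visAt setVis
    simp only [List.getD_eq_getElem?_getD]
    rw [hca, hdb]
    by_cases hlt : a.toNat < v.length
    · rw [List.getElem?_set_self hlt]
      simp only [Option.getD_some]
      by_cases hbl : b.toNat < ((v[a.toNat]?).getD []).length
      · rw [List.getElem?_set_self hbl]; rfl
      · rw [List.set_eq_of_length_le (by omega), List.getElem?_eq_none (by omega)]
        rfl
    · rw [List.set_eq_of_length_le (by omega)]
      unfold visAt at h
      simp only [List.getD_eq_getElem?_getD] at h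
      rw [hca, hdb] at h
      exact h
  · rw [visAt_setVis_other hne]; exact h

theorem goodShape_setVis {m n : Int} {v : List (List Bool)} (a b : Int)
    (hsh : GoodShape m n v) : GoodShape m n (setVis v a b) := by
  obtain ⟨hsl, hrow⟩ := hsh
  constructor
  · rw [setVis, List.length_set]; exact hsl
  · intro r hr
    by_cases hlt : a.toNat < v.length
    · rcases List.mem_or_eq_of_mem_set hr with h | h
      · exact hrow _ h
      · subst h
        rw [List.length_set]
        have hrw : v.getD a.toNat [] = v[a.toNat] := by
          rw [List.getD_eq_getElem?_getD, List.getElem?_eq_getElem hlt]; rfl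
        rw [hrw]; exact hrow _ (List.getElem_mem hlt)
    · rw [setVis, List.set_eq_of_length_le (by omega)] at hr
      exact hrow _ hr

theorem visAt_bfsStep_mono {m n : Int} {pic : List (List Int)} {a b : Int}
    {st : List (List Bool) × List (Int × Int) × Int} {d c e : Int}
    (h : visAt st.1 c e = true) : visAt (bfsStep m n pic a b st d).1 c e = true := by
  simp only [bfsStep]
  split_ifs with h1 h2
  · exact visAt_setVis_mono h
  · exact h
  · exact h

theorem visAt_bfsFold_mono {m n : Int} {pic : List (List Int)} {a b : Int}
    (ds : List Int) (st : List (List Bool) × List (Int × Int) × Int) {c e : Int}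
    (h : visAt st.1 c e = true) :
    visAt ((ds.foldl (bfsStep m n pic a b) st)).1 c e = true := by
  induction ds generalizing st with
  | nil => exact h
  | cons d ds ih =>
    rw [List.foldl_cons]
    exact ih _ (visAt_bfsStep_mono h)

-- spec of the four-direction fold in one BFS round
theorem inB_ne_toNat {m n : Int} {c d : Int × Int} (hc : InB m n c) (hd : InB m n d)
    (hne : c ≠ d) : ¬(c.1.toNat = d.1.toNat ∧ c.2.toNat = d.2.toNat) := by
  obtain ⟨hc1, _, hc2, _⟩ := hc
  obtain ⟨hd1, _, hd2, _⟩ := hd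
  rintro ⟨h1, h2⟩
  exact hne (Prod.ext_iff.mpr ⟨by omega, by omega⟩)

theorem deltaVals :
    PySem.List.pyGetD ([0, 1, 0, -1] : List Int) 0 0 = 0 ∧ PySem.List.pyGetD ([1, 0, -1, 0] : List Int) 0 0 = 1 ∧
    PySem.List.pyGetD ([0, 1, 0, -1] : List Int) 1 0 = 1 ∧ PySem.List.pyGetD ([1, 0, -1, 0] : List Int) 1 0 = 0 ∧
    PySem.List.pyGetD ([0, 1, 0, -1] : List Int) 2 0 = 0 ∧ PySem.List.pyGetD ([1, 0, -1, 0] : List Int) 2 0 = -1 ∧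
    PySem.List.pyGetD ([0, 1, 0, -1] : List Int) 3 0 = -1 ∧ PySem.List.pyGetD ([1, 0, -1, 0] : List Int) 3 0 = 0 := by
  decide

theorem bfsFold_spec (m n : Int) (pic : List (List Int)) (a b : Int) :
    ∀ (ds : List Int), (∀ d ∈ ds, d = 0 ∨ d = 1 ∨ d = 2 ∨ d = 3) →
    ∀ (v : List (List Bool)) (rest : List (Int × Int)) (cnt : Int),
      GoodShape m n v →
      ∃ new : List (Int × Int),
        (ds.foldl (bfsStep m n pic a b) (v, rest, cnt)).2.1 = rest ++ new ∧
        (ds.foldl (bfsStep m n pic a b) (v, rest, cnt)).2.2 = cnt + new.length ∧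
        GoodShape m n (ds.foldl (bfsStep m n pic a b) (v, rest, cnt)).1 ∧
        (∀ c ∈ new, InB m n c ∧ visAt v c.1 c.2 = false ∧
          picAt pic a b = picAt pic c.1 c.2 ∧
          (c = (a, b + 1) ∨ c = (a + 1, b) ∨ c = (a, b - 1) ∨ c = (a - 1, b))) ∧
        new.Nodup ∧
        (∀ c : Int × Int, InB m n c →
          (visAt (ds.foldl (bfsStep m n pic a b) (v, rest, cnt)).1 c.1 c.2 = true ↔
            visAt v c.1 c.2 = true ∨ c ∈ new)) ∧
        (∀ d ∈ ds, ∀ c : Int × Int,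
          c = (a + PySem.List.pyGetD [0, 1, 0, -1] d 0, b + PySem.List.pyGetD [1, 0, -1, 0] d 0) →
          InB m n c → picAt pic a b = picAt pic c.1 c.2 →
          visAt (ds.foldl (bfsStep m n pic a b) (v, rest, cnt)).1 c.1 c.2 = true) := by
  intro ds
  induction ds with
  | nil =>
    intro _ v rest cnt hsh
    refine ⟨[], by simp, by simp, hsh, by simp, List.nodup_nil, ?_, by simp⟩
    intro c _
    simp
  | cons d ds ih =>
    intro hds v rest cnt hsh
    have hdmem : d = 0 ∨ d = 1 ∨ d = 2 ∨ d = 3 := hds d List.mem_cons_self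
    have hds' : ∀ x ∈ ds, x = 0 ∨ x = 1 ∨ x = 2 ∨ x = 3 :=
      fun x hx => hds x (List.mem_cons_of_mem _ hx)
    simp only [List.foldl_cons, bfsStep]
    set na := a + PySem.List.pyGetD [0, 1, 0, -1] d 0 with hna
    set nb := b + PySem.List.pyGetD [1, 0, -1, 0] d 0 with hnb
    split_ifs with hg hv
    · -- neighbour marked and enqueued
      have hInBn : InB m n (na, nb) := hg
      have hself : visAt (setVis v na nb) na nb = true := visAt_setVis_self hsh hInBn
      obtain ⟨new₂, h1, h2, h3, h4, h5, h6, h7⟩ :=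
        ih hds' (setVis v na nb) (rest ++ [(na, nb)]) (cnt + 1) (goodShape_setVis na nb hsh)
      have hdelta : (na, nb) = (a, b + 1) ∨ (na, nb) = (a + 1, b) ∨
          (na, nb) = (a, b - 1) ∨ (na, nb) = (a - 1, b) := by
        obtain ⟨e1, e2, e3, e4, e5, e6, e7, e8⟩ := deltaVals
        rcases hdmem with rfl | rfl | rfl | rfl
        · left; rw [hna, hnb, e1, e2]; exact Prod.ext_iff.mpr ⟨by ring, by ring⟩
        · right; left; rw [hna, hnb, e3, e4]; exact Prod.ext_iff.mpr ⟨by ring, by ring⟩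
        · right; right; left; rw [hna, hnb, e5, e6]; exact Prod.ext_iff.mpr ⟨by ring, by ring⟩
        · right; right; right; rw [hna, hnb, e7, e8]; exact Prod.ext_iff.mpr ⟨by ring, by ring⟩
      have hvchar : ∀ c : Int × Int, InB m n c →
          (visAt (setVis v na nb) c.1 c.2 = true ↔ visAt v c.1 c.2 = true ∨ c = (na, nb)) := by
        intro c hc
        by_cases hceq : c = (na, nb)
        · subst hceq
          exact iff_of_true hself (Or.inr rfl)
        · rw [visAt_setVis_other (inB_ne_toNat hc hInBn hceq)]
          simp [hceq]
      refine ⟨(na, nb) :: new₂, ?_, ?_, h3, ?_, ?_, ?_, ?_⟩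
      · rw [h1]; simp
      · rw [h2]; simp; ring
      · intro c hc
        rcases List.mem_cons.mp hc with rfl | hc
        · exact ⟨hInBn, hv.1, hv.2, hdelta⟩
        · obtain ⟨hb1, hb2, hb3, hb4⟩ := h4 c hc
          refine ⟨hb1, ?_, hb3, hb4⟩
          by_contra hvv
          have : visAt v c.1 c.2 = true := by
            cases hvt : visAt v c.1 c.2
            · exact absurd hvt hvv
            · rfl
          rw [visAt_setVis_mono this] at hb2
          exact absurd hb2 (by simp)
      · refine List.nodup_cons.mpr ⟨?_, h5⟩
        intro hmem
        have := (h4 _ hmem).2.1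
        rw [hself] at this
        exact absurd this (by simp)
      · intro c hc
        rw [h6 c hc, hvchar c hc, List.mem_cons]
        tauto
      · intro d' hd' c hc hInB hcol
        rcases List.mem_cons.mp hd' with rfl | hd'
        · rw [← hna, ← hnb] at hc
          subst hc
          exact visAt_bfsFold_mono ds _ hself
        · exact h7 d' hd' c hc hInB hcol
    · -- in bounds but not marked (already visited, or different colour)
      obtain ⟨new, h1, h2, h3, h4, h5, h6, h7⟩ := ih hds' v rest cnt hsh
      refine ⟨new, h1, h2, h3, h4, h5, h6, ?_⟩
      intro d' hd' c hc hInB hcol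
      rcases List.mem_cons.mp hd' with rfl | hd'
      · rw [← hna, ← hnb] at hc
        subst hc
        have hvt : visAt v na nb = true := by
          cases hvv : visAt v na nb
          · exact absurd ⟨hvv, hcol⟩ hv
          · rfl
        exact visAt_bfsFold_mono ds _ hvt
      · exact h7 d' hd' c hc hInB hcol
    · -- out of bounds
      obtain ⟨new, h1, h2, h3, h4, h5, h6, h7⟩ := ih hds' v rest cnt hsh
      refine ⟨new, h1, h2, h3, h4, h5, h6, ?_⟩
      intro d' hd' c hc hInB hcol
      rcases List.mem_cons.mp hd' with rfl | hd'
      · rw [← hna, ← hnb] at hc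
        subst hc
        exact absurd hInB hg
      · exact h7 d' hd' c hc hInB hcol

-- main BFS lemma: bfsLoop marks exactly the component of s and counts its size
theorem bfs_main (m n : Int) (pic : List (List Int)) (s : Int × Int) (P0 : Int × Int → Prop)
    (hs0 : InB m n s) (hP0 : ∀ c, Reach m n pic s c → ¬ P0 c) :
    ∀ (μ : Nat) (v : List (List Bool)) (q : List (Int × Int)) (cnt : Int) (E : List (Int × Int)),
      5 * countFalse v + q.length ≤ μ →
      GoodShape m n v →
      (∀ c : Int × Int, InB m n c → (visAt v c.1 c.2 = true ↔ P0 c ∨ c ∈ E)) →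
      (∀ c ∈ E, Reach m n pic s c) →
      (∀ c ∈ q, c ∈ E) →
      E.Nodup →
      cnt = (E.length : Int) →
      s ∈ E →
      (∀ c ∈ E, c ∉ q → ∀ d : Int × Int, StepR m n pic c d → visAt v d.1 d.2 = true) →
      ∃ E' : List (Int × Int),
        E'.Nodup ∧ (∀ c, c ∈ E' ↔ Reach m n pic s c) ∧
        (bfsLoop m n pic v q cnt).2 = (E'.length : Int) ∧
        GoodShape m n (bfsLoop m n pic v q cnt).1 ∧
        (∀ c : Int × Int, InB m n c →
          (visAt (bfsLoop m n pic v q cnt).1 c.1 c.2 = true ↔ P0 c ∨ c ∈ E')) := by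
  intro μ
  induction μ using Nat.strong_induction_on with
  | _ μ IH =>
    intro v q cnt E hμ hsh hvis hE hq hnd hcnt hs hproc
    match q with
    | [] =>
      refine ⟨E, hnd, ?_, by rw [bfsLoop]; exact hcnt, by rw [bfsLoop]; exact hsh, ?_⟩
      · intro c
        constructor
        · exact hE c
        · intro hr
          induction hr with
          | refl => exact hs
          | tail hr' hstep ih =>
            have hvt := hproc _ ih (List.not_mem_nil) _ hstep
            have hInB := hstep.2.1
            rcases (hvis _ hInB).mp hvt with hP | hmem
            · exact absurd hP (hP0 _ (Relation.ReflTransGen.tail hr' hstep))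
            · exact hmem
      · intro c hc
        rw [bfsLoop]
        exact hvis c hc
    | (a, b) :: rest =>
      have hab : (a, b) ∈ E := hq _ List.mem_cons_self
      have hreachab : Reach m n pic s (a, b) := hE _ hab
      have habInB : InB m n (a, b) := reach_inB hs0 hreachab
      obtain ⟨new, h1, h2, h3, h4, h5, h6, h7⟩ :=
        bfsFold_spec m n pic a b (PySem.List.pyRange 0 4 1)
          (by intro d hd; have := PySem.List.mem_pyRange_one.mp hd; omega)
          v rest cnt hsh
      have hmeas := bfsFold_measure m n pic a b (PySem.List.pyRange 0 4 1) (v, rest, cnt)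
      -- the new cells are exactly the freshly discovered neighbours of (a,b)
      have hnewstep : ∀ c ∈ new, StepR m n pic (a, b) c := by
        intro c hc
        obtain ⟨hb1, _, hb3, hb4⟩ := h4 c hc
        exact ⟨habInB, hb1, hb3, hb4⟩
      have hnewreach : ∀ c ∈ new, Reach m n pic s c :=
        fun c hc => Relation.ReflTransGen.tail hreachab (hnewstep c hc)
      have hnewfresh : ∀ c ∈ new, ¬(P0 c ∨ c ∈ E) := by
        intro c hc hor
        have := (hvis c (h4 c hc).1).mpr hor
        rw [(h4 c hc).2.1] at this
        exact absurd this (by simp)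
      rw [bfsLoop]
      set st := (PySem.List.pyRange 0 4 1).foldl (bfsStep m n pic a b) (v, rest, cnt) with hst
      have hlt : 5 * countFalse st.1 + st.2.1.length < μ := by
        have hmeas' : 5 * countFalse st.1 + st.2.1.length ≤ 5 * countFalse v + rest.length := hmeas
        simp only [List.length_cons] at hμ
        omega
      have hq1 : ∀ c ∈ st.2.1, c ∈ E ++ new := by
        rw [h1]
        intro c hc
        rcases List.mem_append.mp hc with hc | hc
        · exact List.mem_append_left _ (hq _ (List.mem_cons_of_mem _ hc))
        · exact List.mem_append_right _ hc
      obtain ⟨E', hE1, hE2, hE3, hE4, hE5⟩ :=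
        IH _ hlt st.1 st.2.1 st.2.2 (E ++ new) (le_refl _) h3
          (by
            intro c hc
            rw [h6 c hc, hvis c hc, List.mem_append]
            tauto)
          (by
            intro c hc
            rcases List.mem_append.mp hc with hc | hc
            · exact hE c hc
            · exact hnewreach c hc)
          hq1
          (by
            refine List.Nodup.append hnd h5 ?_
            intro c hcE hcnew
            exact hnewfresh c hcnew (Or.inr hcE))
          (by rw [h2, hcnt]; simp)
          (List.mem_append_left _ hs)
          (by
            intro c hcE hcq d hd
            rw [h1] at hcq
            rcases List.mem_append.mp hcE with hcE | hcE
            · by_cases hcab : c = (a, b)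
              · subst hcab
                obtain ⟨_, hdInB, hdcol, hddel⟩ := hd
                have hc4 : ∀ dd : Int, dd = 0 ∨ dd = 1 ∨ dd = 2 ∨ dd = 3 →
                    d = (a + PySem.List.pyGetD [0, 1, 0, -1] dd 0,
                          b + PySem.List.pyGetD [1, 0, -1, 0] dd 0) →
                    visAt st.1 d.1 d.2 = true := by
                  intro dd hdd heq
                  refine h7 dd ?_ d heq hdInB hdcol
                  rcases hdd with rfl | rfl | rfl | rfl <;> decide
                obtain ⟨e1, e2, e3, e4, e5, e6, e7, e8⟩ := deltaVals
                rcases hddel with hdel | hdel | hdel | hdel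
                · exact hc4 0 (by tauto) (by rw [e1, e2, hdel]; exact Prod.ext_iff.mpr ⟨by ring, by ring⟩)
                · exact hc4 1 (by tauto) (by rw [e3, e4, hdel]; exact Prod.ext_iff.mpr ⟨by ring, by ring⟩)
                · exact hc4 2 (by tauto) (by rw [e5, e6, hdel]; exact Prod.ext_iff.mpr ⟨by ring, by ring⟩)
                · exact hc4 3 (by tauto) (by rw [e7, e8, hdel]; exact Prod.ext_iff.mpr ⟨by ring, by ring⟩)
              · have hcrest : c ∉ ((a, b) :: rest) := by
                  intro hmem
                  rcases List.mem_cons.mp hmem with h | h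
                  · exact hcab h
                  · exact hcq (List.mem_append_left _ h)
                have hvd := hproc c hcE hcrest d hd
                have hdInB := hd.2.1
                exact (h6 d hdInB).mpr (Or.inl hvd)
            · exact absurd (List.mem_append_right rest hcE) hcq)
      exact ⟨E', hE1, hE2, hE3, hE4, hE5⟩

-- ---- saturation (port B) ----

def NbrOf (m n : Int) (pic : List (List Int)) (c0 : Int) (p x : Int × Int) : Prop :=
  ∃ dl ∈ deltasB, x = (p.1 + dl.1, p.2 + dl.2) ∧ InB m n x ∧ picAt pic x.1 x.2 = c0

theorem stepR_of_nbr {m n : Int} {pic : List (List Int)} {c0 : Int} {p x : Int × Int}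
    (hp : InB m n p) (hcol : picAt pic p.1 p.2 = c0) (h : NbrOf m n pic c0 p x) :
    StepR m n pic p x := by
  obtain ⟨dl, hdl, hx, hInB, hxc⟩ := h
  refine ⟨hp, hInB, by rw [hcol, hxc], ?_⟩
  simp only [deltasB, List.mem_cons, List.not_mem_nil, or_false] at hdl
  rcases hdl with rfl | rfl | rfl | rfl
  · left; rw [hx]; exact Prod.ext_iff.mpr ⟨by ring, by ring⟩
  · right; left; rw [hx]; exact Prod.ext_iff.mpr ⟨by ring, by ring⟩
  · right; right; left; rw [hx]; exact Prod.ext_iff.mpr ⟨by ring, by ring⟩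
  · right; right; right; rw [hx]; exact Prod.ext_iff.mpr ⟨by ring, by ring⟩

theorem nbr_of_stepR {m n : Int} {pic : List (List Int)} {c0 : Int} {p x : Int × Int}
    (h : StepR m n pic p x) (hxc : picAt pic x.1 x.2 = c0) : NbrOf m n pic c0 p x := by
  obtain ⟨hp, hx, hcol, hdel⟩ := h
  rcases hdel with rfl | rfl | rfl | rfl
  · exact ⟨(0, 1), by simp [deltasB], Prod.ext_iff.mpr ⟨by ring, by ring⟩, hx, hxc⟩
  · exact ⟨(1, 0), by simp [deltasB], Prod.ext_iff.mpr ⟨by ring, by ring⟩, hx, hxc⟩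
  · exact ⟨(0, -1), by simp [deltasB], Prod.ext_iff.mpr ⟨by ring, by ring⟩, hx, hxc⟩
  · exact ⟨(-1, 0), by simp [deltasB], Prod.ext_iff.mpr ⟨by ring, by ring⟩, hx, hxc⟩

theorem mem_deltaFold (m n : Int) (pic : List (List Int)) (c0 : Int) (c : Int × Int) :
    ∀ (dls : List (Int × Int)) (acc : PySem.Set (Int × Int)) (x : Int × Int),
      (x ∈ dls.foldl (fun acc dl =>
        if (0 ≤ c.1 + dl.1 ∧ c.1 + dl.1 < m ∧ 0 ≤ c.2 + dl.2 ∧ c.2 + dl.2 < n) ∧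
            picAt pic (c.1 + dl.1) (c.2 + dl.2) = c0 then
          PySem.Set.add acc (c.1 + dl.1, c.2 + dl.2)
        else acc) acc ↔
      x ∈ acc ∨ ∃ dl ∈ dls, x = (c.1 + dl.1, c.2 + dl.2) ∧ InB m n x ∧ picAt pic x.1 x.2 = c0) := by
  intro dls
  induction dls with
  | nil => intro acc x; simp
  | cons dl0 dls ih =>
    intro acc x
    rw [List.foldl_cons, List.exists_mem_cons_iff]
    split_ifs with hg
    · rw [ih, PySem.Set.mem_add]
      have hiff : (x = (c.1 + dl0.1, c.2 + dl0.2) ∧ InB m n x ∧ picAt pic x.1 x.2 = c0) ↔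
          x = (c.1 + dl0.1, c.2 + dl0.2) := by
        constructor
        · exact fun h => h.1
        · rintro rfl; exact ⟨rfl, hg.1, hg.2⟩
      rw [hiff]
      tauto
    · rw [ih]
      have hnot : ¬(x = (c.1 + dl0.1, c.2 + dl0.2) ∧ InB m n x ∧ picAt pic x.1 x.2 = c0) := by
        rintro ⟨rfl, hI, hC⟩
        exact hg ⟨hI, hC⟩
      tauto

theorem mem_expandOnce {m n : Int} {pic : List (List Int)} {c0 : Int}
    (comp : PySem.Set (Int × Int)) (x : Int × Int) :
    x ∈ expandOnce m n pic c0 comp ↔ x ∈ comp ∨ ∃ p ∈ comp, NbrOf m n pic c0 p x := by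
  unfold expandOnce
  suffices h : ∀ (l acc : List (Int × Int)),
      (x ∈ l.foldl (fun acc c => deltasB.foldl (fun acc dl =>
        if (0 ≤ c.1 + dl.1 ∧ c.1 + dl.1 < m ∧ 0 ≤ c.2 + dl.2 ∧ c.2 + dl.2 < n) ∧
            picAt pic (c.1 + dl.1) (c.2 + dl.2) = c0 then
          PySem.Set.add acc (c.1 + dl.1, c.2 + dl.2)
        else acc) acc) acc ↔ x ∈ acc ∨ ∃ p ∈ l, NbrOf m n pic c0 p x) by
    exact h comp comp
  intro l
  induction l with
  | nil => intro acc; simp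
  | cons p0 l ih =>
    intro acc
    rw [List.foldl_cons, List.exists_mem_cons_iff, ih, mem_deltaFold]
    unfold NbrOf
    rw [or_assoc]

theorem prefix_deltaFold (m n : Int) (pic : List (List Int)) (c0 : Int) (c : Int × Int) :
    ∀ (dls : List (Int × Int)) (acc : PySem.Set (Int × Int)),
      acc <+: dls.foldl (fun acc dl =>
        if (0 ≤ c.1 + dl.1 ∧ c.1 + dl.1 < m ∧ 0 ≤ c.2 + dl.2 ∧ c.2 + dl.2 < n) ∧
            picAt pic (c.1 + dl.1) (c.2 + dl.2) = c0 then
          PySem.Set.add acc (c.1 + dl.1, c.2 + dl.2)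
        else acc) acc := by
  intro dls
  induction dls with
  | nil => intro acc; exact List.prefix_refl _
  | cons dl0 dls ih =>
    intro acc
    rw [List.foldl_cons]
    refine List.IsPrefix.trans ?_ (ih _)
    split_ifs with hg
    · rw [PySem.Set.add_eq_ite]
      split_ifs with hmem
      · exact List.prefix_refl _
      · exact List.prefix_append _ _
    · exact List.prefix_refl _

theorem expandOnce_prefix {m n : Int} {pic : List (List Int)} {c0 : Int}
    (comp : PySem.Set (Int × Int)) : comp <+: expandOnce m n pic c0 comp := by
  unfold expandOnce
  suffices h : ∀ (l acc : List (Int × Int)),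
      acc <+: l.foldl (fun acc c => deltasB.foldl (fun acc dl =>
        if (0 ≤ c.1 + dl.1 ∧ c.1 + dl.1 < m ∧ 0 ≤ c.2 + dl.2 ∧ c.2 + dl.2 < n) ∧
            picAt pic (c.1 + dl.1) (c.2 + dl.2) = c0 then
          PySem.Set.add acc (c.1 + dl.1, c.2 + dl.2)
        else acc) acc) acc by
    exact h comp comp
  intro l
  induction l with
  | nil => intro acc; exact List.prefix_refl _
  | cons p0 l ih =>
    intro acc
    rw [List.foldl_cons]
    exact List.IsPrefix.trans (prefix_deltaFold m n pic c0 p0 deltasB acc) (ih _)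

theorem nodup_deltaFold (m n : Int) (pic : List (List Int)) (c0 : Int) (c : Int × Int) :
    ∀ (dls : List (Int × Int)) (acc : PySem.Set (Int × Int)), acc.Nodup →
      (dls.foldl (fun acc dl =>
        if (0 ≤ c.1 + dl.1 ∧ c.1 + dl.1 < m ∧ 0 ≤ c.2 + dl.2 ∧ c.2 + dl.2 < n) ∧
            picAt pic (c.1 + dl.1) (c.2 + dl.2) = c0 then
          PySem.Set.add acc (c.1 + dl.1, c.2 + dl.2)
        else acc) acc).Nodup := by
  intro dls
  induction dls with
  | nil => intro acc h; exact h
  | cons dl0 dls ih =>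
    intro acc h
    rw [List.foldl_cons]
    refine ih _ ?_
    split_ifs with hg
    · exact PySem.Set.nodup_add acc _ h
    · exact h

theorem expandOnce_nodup {m n : Int} {pic : List (List Int)} {c0 : Int}
    (comp : PySem.Set (Int × Int)) (h : comp.Nodup) : (expandOnce m n pic c0 comp).Nodup := by
  unfold expandOnce
  suffices hgen : ∀ (l acc : List (Int × Int)), acc.Nodup →
      (l.foldl (fun acc c => deltasB.foldl (fun acc dl =>
        if (0 ≤ c.1 + dl.1 ∧ c.1 + dl.1 < m ∧ 0 ≤ c.2 + dl.2 ∧ c.2 + dl.2 < n) ∧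
            picAt pic (c.1 + dl.1) (c.2 + dl.2) = c0 then
          PySem.Set.add acc (c.1 + dl.1, c.2 + dl.2)
        else acc) acc) acc).Nodup by
    exact hgen comp comp h
  intro l
  induction l with
  | nil => intro acc h'; exact h'
  | cons p0 l ih =>
    intro acc h'
    rw [List.foldl_cons]
    exact ih _ (nodup_deltaFold m n pic c0 p0 deltasB acc h')

theorem foldl_const_iterate {α β : Type} (f : α → α) :
    ∀ (l : List β) (x : α), l.foldl (fun a _ => f a) x = f^[l.length] x := by
  intro l
  induction l with
  | nil => intro x; rfl
  | cons y l ih =>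
    intro x
    rw [List.foldl_cons, ih, List.length_cons, Function.iterate_succ_apply]

theorem nodup_inB_length_le {m n : Int} (l : List (Int × Int)) (hnd : l.Nodup)
    (hin : ∀ c ∈ l, InB m n c) : l.length ≤ m.toNat * n.toNat := by
  classical
  set f : Int × Int → Nat × Nat := fun c => (c.1.toNat, c.2.toNat) with hf
  have hmapnd : (l.map f).Nodup := by
    refine List.Nodup.map_on ?_ hnd
    intro c hc d hd heq
    obtain ⟨hc1, _, hc2, _⟩ := hin c hc
    obtain ⟨hd1, _, hd2, _⟩ := hin d hd
    have h1 : c.1.toNat = d.1.toNat := congrArg Prod.fst heq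
    have h2 : c.2.toNat = d.2.toNat := congrArg Prod.snd heq
    exact Prod.ext_iff.mpr ⟨by omega, by omega⟩
  have hsub : (l.map f).toFinset ⊆ Finset.range m.toNat ×ˢ Finset.range n.toNat := by
    intro x hx
    rw [List.mem_toFinset, List.mem_map] at hx
    obtain ⟨c, hc, rfl⟩ := hx
    obtain ⟨hc1, hc2, hc3, hc4⟩ := hin c hc
    rw [Finset.mem_product, Finset.mem_range, Finset.mem_range]
    constructor <;> simp [hf] <;> omega
  calc l.length = (l.map f).length := by simp
    _ = (l.map f).toFinset.card := (List.toFinset_card_of_nodup hmapnd).symm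
    _ ≤ (Finset.range m.toNat ×ˢ Finset.range n.toNat).card := Finset.card_le_card hsub
    _ = m.toNat * n.toNat := by rw [Finset.card_product, Finset.card_range, Finset.card_range]

-- the saturation loop of B computes exactly the component of s
theorem sat_spec (m n : Int) (pic : List (List Int)) (s : Int × Int) (hsInB : InB m n s) :
    ((PySem.List.pyRange 0 (m * n) 1).foldl
        (fun comp _ => expandOnce m n pic (picAt pic s.1 s.2) comp)
        (PySem.Set.ofList [s])).Nodup ∧
    (∀ c, c ∈ ((PySem.List.pyRange 0 (m * n) 1).foldl
        (fun comp _ => expandOnce m n pic (picAt pic s.1 s.2) comp)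
        (PySem.Set.ofList [s])) ↔ Reach m n pic s c) := by
  obtain ⟨hs1, hs2, hs3, hs4⟩ := hsInB
  have hsInB' : InB m n s := ⟨hs1, hs2, hs3, hs4⟩
  set c0 := picAt pic s.1 s.2 with hc0
  set base : PySem.Set (Int × Int) := PySem.Set.ofList [s] with hbasedef
  have hbase : base = [s] := rfl
  have hit : (PySem.List.pyRange 0 (m * n) 1).foldl
      (fun comp _ => expandOnce m n pic c0 comp) base =
      (fun comp => expandOnce m n pic c0 comp)^[(PySem.List.pyRange 0 (m * n) 1).length] base :=
    foldl_const_iterate _ _ _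
  set F := fun comp => expandOnce m n pic c0 comp with hF
  set K := (PySem.List.pyRange 0 (m * n) 1).length with hK
  have hKval : K = m.toNat * n.toNat := by
    rw [hK, PySem.List.length_pyRange_one, sub_zero]
    exact Int.toNat_mul (by omega) (by omega)
  have hinv : ∀ k : Nat, (F^[k] base).Nodup ∧ (∀ c ∈ F^[k] base, Reach m n pic s c) ∧
      s ∈ F^[k] base := by
    intro k
    induction k with
    | zero =>
      rw [Function.iterate_zero_apply, hbase]
      exact ⟨List.nodup_singleton _, by
        intro c hc
        rw [List.mem_singleton] at hc
        subst hc
        exact Relation.ReflTransGen.refl, List.mem_singleton_self _⟩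
    | succ k ih =>
      rw [Function.iterate_succ_apply']
      refine ⟨expandOnce_nodup _ ih.1, ?_, (expandOnce_prefix _).subset ih.2.2⟩
      intro c hc
      rcases (mem_expandOnce _ c).mp hc with hc | ⟨p, hp, hnbr⟩
      · exact ih.2.1 c hc
      · have hrp := ih.2.1 p hp
        have hcolp : picAt pic p.1 p.2 = c0 := by rw [hc0]; exact (reach_color hrp).symm
        exact Relation.ReflTransGen.tail hrp
          (stepR_of_nbr (reach_inB hsInB' hrp) hcolp hnbr)
  have hpre : ∀ k : Nat, F^[k] base <+: F^[k + 1] base := by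
    intro k
    rw [Function.iterate_succ_apply']
    exact expandOnce_prefix _
  have hlen : ∀ k : Nat, (F^[k] base).length ≤ K := by
    intro k
    rw [hKval]
    exact nodup_inB_length_le _ (hinv k).1 (fun c hc => reach_inB hsInB' ((hinv k).2.1 c hc))
  have hstage : ∀ k : Nat, (∀ j, j < k → F^[j + 1] base ≠ F^[j] base) →
      k + 1 ≤ (F^[k] base).length := by
    intro k
    induction k with
    | zero =>
      intro _
      rw [Function.iterate_zero_apply, hbase]
      simp
    | succ k ih =>
      intro h
      have h1 := ih (fun j hj => h j (Nat.lt_succ_of_lt hj))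
      have hne := h k (Nat.lt_succ_self k)
      have hple := (hpre k).length_le
      have hlt : (F^[k] base).length < (F^[k + 1] base).length := by
        rcases Nat.lt_or_ge (F^[k] base).length (F^[k + 1] base).length with h' | h'
        · exact h'
        · exact absurd ((hpre k).eq_of_length (by omega)).symm hne
      omega
  have hjex : ∃ j, j < K ∧ F^[j + 1] base = F^[j] base := by
    by_contra h
    have h' : ∀ j, j < K → F^[j + 1] base ≠ F^[j] base := by
      intro j hj hne
      exact h ⟨j, hj, hne⟩
    have h1 := hstage K h'
    have h2 := hlen K
    omega
  obtain ⟨j, hjK, hjfix⟩ := hjex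
  have hstab : ∀ i : Nat, F^[j + i] base = F^[j] base := by
    intro i
    induction i with
    | zero => rfl
    | succ i ih =>
      have heq : j + (i + 1) = (j + i) + 1 := rfl
      rw [heq, Function.iterate_succ_apply', ih]
      have hstep1 : F (F^[j] base) = F^[j + 1] base := (Function.iterate_succ_apply' F j base).symm
      rw [hstep1, hjfix]
  have hKj : F^[K] base = F^[j] base := by
    have := hstab (K - j)
    rwa [Nat.add_sub_cancel' hjK.le] at this
  have hclosed : ∀ c, Reach m n pic s c → c ∈ F^[K] base := by
    intro c hr
    induction hr with
    | refl => exact (hinv K).2.2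
    | @tail p c hr' hstep ih2 =>
      rw [hKj] at ih2 ⊢
      have hcolc : picAt pic c.1 c.2 = c0 := by
        rw [hc0]
        exact (reach_color (Relation.ReflTransGen.tail hr' hstep)).symm
      have hmem : c ∈ expandOnce m n pic c0 (F^[j] base) :=
        (mem_expandOnce _ c).mpr (Or.inr ⟨p, ih2, nbr_of_stepR hstep hcolc⟩)
      have hexp : expandOnce m n pic c0 (F^[j] base) = F^[j + 1] base :=
        (Function.iterate_succ_apply' F j base).symm
      rw [hexp, hjfix] at hmem
      exact hmem
  rw [hit]
  exact ⟨(hinv K).1, fun c => ⟨fun hc => (hinv K).2.1 c hc, fun hr => hclosed c hr⟩⟩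

-- ---- relating the two outer scans ----

theorem foldl_rel {α β ι : Type} (R : α → β → Prop) (fA : α → ι → α) (fB : β → ι → β) :
    ∀ (l : List ι) (a : α) (b : β), R a b →
      (∀ x ∈ l, ∀ (a : α) (b : β), R a b → R (fA a x) (fB b x)) →
      R (l.foldl fA a) (l.foldl fB b) := by
  intro l
  induction l with
  | nil => intro a b h _; exact h
  | cons x l ih =>
    intro a b h hstep
    rw [List.foldl_cons, List.foldl_cons]
    exact ih _ _ (hstep x List.mem_cons_self a b h)
      (fun y hy => hstep y (List.mem_cons_of_mem _ hy))

def OuterInv (m n : Int) (pic : List (List Int))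
    (sA : List (List Bool) × List Int) (sB : PySem.Set (Int × Int) × List Int) : Prop :=
  GoodShape m n sA.1 ∧ sA.2 = sB.2 ∧ sB.1.Nodup ∧ (∀ c ∈ sB.1, InB m n c) ∧
  (∀ c : Int × Int, InB m n c → (visAt sA.1 c.1 c.2 = true ↔ c ∈ sB.1)) ∧
  (∀ c ∈ sB.1, ∀ d : Int × Int, StepR m n pic c d → d ∈ sB.1)

theorem done_reach_closed {m n : Int} {pic : List (List Int)} {done : List (Int × Int)}
    (hcl : ∀ c ∈ done, ∀ d : Int × Int, StepR m n pic c d → d ∈ done)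
    {p x : Int × Int} (hp : p ∈ done) (hr : Reach m n pic p x) : x ∈ done := by
  induction hr with
  | refl => exact hp
  | tail _ hstep ih => exact hcl _ ih _ hstep

theorem cell_step (m n : Int) (pic : List (List Int)) (i j : Int)
    (hi : 0 ≤ i ∧ i < m) (hj : 0 ≤ j ∧ j < n)
    (sA : List (List Bool) × List Int) (sB : PySem.Set (Int × Int) × List Int)
    (hR : OuterInv m n pic sA sB) :
    OuterInv m n pic
      (if picAt pic i j ≠ 0 ∧ visAt sA.1 i j = false then
        ((bfsLoop m n pic (setVis sA.1 i j) [(i, j)] 1).1,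
          sA.2 ++ [(bfsLoop m n pic (setVis sA.1 i j) [(i, j)] 1).2])
      else sA)
      (if picAt pic i j ≠ 0 ∧ (i, j) ∉ sB.1 then
        (PySem.Set.union sB.1 ((PySem.List.pyRange 0 (m * n) 1).foldl
            (fun comp _ => expandOnce m n pic (picAt pic i j) comp) (PySem.Set.ofList [(i, j)])),
          sB.2 ++ [PySem.Set.len ((PySem.List.pyRange 0 (m * n) 1).foldl
            (fun comp _ => expandOnce m n pic (picAt pic i j) comp) (PySem.Set.ofList [(i, j)]))])
      else sB) := by
  obtain ⟨h1, h2, h3, h4, h5, h6⟩ := hR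
  have hInBij : InB m n (i, j) := ⟨hi.1, hi.2, hj.1, hj.2⟩
  have hvd : visAt sA.1 i j = false ↔ (i, j) ∉ sB.1 := by
    have h5' := h5 (i, j) hInBij
    constructor
    · intro hf hmem
      rw [h5'.mpr hmem] at hf
      exact absurd hf (by simp)
    · intro hmem
      cases hvv : visAt sA.1 i j
      · rfl
      · exact absurd (h5'.mp hvv) hmem
  by_cases hg : picAt pic i j ≠ 0 ∧ visAt sA.1 i j = false
  · rw [if_pos hg, if_pos ⟨hg.1, hvd.mp hg.2⟩]
    have hsnotdone : (i, j) ∉ sB.1 := hvd.mp hg.2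
    have hP0 : ∀ c, Reach m n pic (i, j) c → ¬ (c ∈ sB.1) := by
      intro c hr hcdone
      exact hsnotdone (done_reach_closed h6 hcdone (reach_symm hr))
    obtain ⟨E', hE'nd, hE'mem, hcnt', hshape', hvis'⟩ :=
      bfs_main m n pic (i, j) (fun c => c ∈ sB.1) hInBij hP0
        (5 * countFalse (setVis sA.1 i j) + 1)
        (setVis sA.1 i j) [(i, j)] 1 [(i, j)]
        (by simp)
        (goodShape_setVis i j h1)
        (by
          intro c hc
          by_cases hceq : c = (i, j)
          · subst hceq
            exact iff_of_true (visAt_setVis_self h1 hInBij) (Or.inr (List.mem_singleton_self _))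
          · rw [visAt_setVis_other (inB_ne_toNat hc hInBij hceq), h5 c hc]
            simp [hceq])
        (by
          intro c hc
          rw [List.mem_singleton] at hc
          subst hc
          exact Relation.ReflTransGen.refl)
        (fun c hc => hc)
        (List.nodup_singleton _)
        (by simp)
        (List.mem_singleton_self _)
        (by
          intro c hcE hcq
          exact absurd hcE hcq)
    obtain ⟨hCnd, hCmem⟩ := sat_spec m n pic (i, j) hInBij
    have hperm : E'.Perm ((PySem.List.pyRange 0 (m * n) 1).foldl
        (fun comp _ => expandOnce m n pic (picAt pic i j) comp) (PySem.Set.ofList [(i, j)])) :=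
      (List.perm_ext_iff_of_nodup hE'nd hCnd).mpr
        (fun x => (hE'mem x).trans (hCmem x).symm)
    refine ⟨hshape', ?_, ?_, ?_, ?_, ?_⟩
    · show sA.2 ++ _ = sB.2 ++ _
      rw [h2]
      have hlen2 : ((E'.length : Nat) : Int) = PySem.Set.len ((PySem.List.pyRange 0 (m * n) 1).foldl
          (fun comp _ => expandOnce m n pic (picAt pic i j) comp) (PySem.Set.ofList [(i, j)])) := by
        unfold PySem.Set.len
        rw [hperm.length_eq]
      rw [hcnt', hlen2]
    · exact PySem.Set.nodup_union _ _ h3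
    · intro c hc
      rcases (PySem.Set.mem_union _ _ _).mp hc with hc | hc
      · exact h4 c hc
      · exact reach_inB hInBij ((hCmem c).mp hc)
    · intro c hc
      rw [hvis' c hc, PySem.Set.mem_union, hE'mem, hCmem]
    · intro c hc d hd
      rcases (PySem.Set.mem_union _ _ _).mp hc with hc | hc
      · exact (PySem.Set.mem_union _ _ _).mpr (Or.inl (h6 c hc d hd))
      · exact (PySem.Set.mem_union _ _ _).mpr
          (Or.inr ((hCmem d).mpr (Relation.ReflTransGen.tail ((hCmem c).mp hc) hd)))
  · rw [if_neg hg, if_neg (by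
      intro hgb
      exact hg ⟨hgb.1, hvd.mpr hgb.2⟩)]
    exact ⟨h1, h2, h3, h4, h5, h6⟩

theorem main_equal (m : Int) (n : Int) (picture : List (List Int)) :
    kakao_friends_coloring_book m n picture = kakao_friends_coloring_book_alt m n picture := by
  have hinit : OuterInv m n picture
      (List.replicate m.toNat (List.replicate n.toNat false), ([] : List Int))
      ((PySem.Set.empty : PySem.Set (Int × Int)), ([] : List Int)) := by
    refine ⟨⟨List.length_replicate, ?_⟩, rfl, List.nodup_nil, by simp [PySem.Set.empty], ?_, by simp [PySem.Set.empty]⟩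
    · intro r hr
      rw [List.eq_of_mem_replicate hr, List.length_replicate]
    · intro c hc
      have hfalse : visAt (List.replicate m.toNat (List.replicate n.toNat false)) c.1 c.2 = false := by
        unfold visAt
        obtain ⟨hc1, hc2, hc3, hc4⟩ := hc
        have hr1 : (List.replicate m.toNat (List.replicate n.toNat false)).getD c.1.toNat [] =
            List.replicate n.toNat false := by
          rw [List.getD_eq_getElem?_getD, List.getElem?_replicate_of_lt (by omega)]
          rfl
        rw [hr1, List.getD_eq_getElem?_getD, List.getElem?_replicate_of_lt (by omega)]
        rfl
      rw [hfalse]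
      simp [PySem.Set.empty]
  have hfold := foldl_rel (OuterInv m n picture)
    (fun st i => (PySem.List.pyRange 0 n 1).foldl (fun st j =>
      if picAt picture i j ≠ 0 ∧ visAt st.1 i j = false then
        ((bfsLoop m n picture (setVis st.1 i j) [(i, j)] 1).1,
          st.2 ++ [(bfsLoop m n picture (setVis st.1 i j) [(i, j)] 1).2])
      else st) st)
    (fun st i => (PySem.List.pyRange 0 n 1).foldl (fun st j =>
      if picAt picture i j ≠ 0 ∧ (i, j) ∉ st.1 then
        (PySem.Set.union st.1 ((PySem.List.pyRange 0 (m * n) 1).foldl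
            (fun comp _ => expandOnce m n picture (picAt picture i j) comp)
            (PySem.Set.ofList [(i, j)])),
          st.2 ++ [PySem.Set.len ((PySem.List.pyRange 0 (m * n) 1).foldl
            (fun comp _ => expandOnce m n picture (picAt picture i j) comp)
            (PySem.Set.ofList [(i, j)]))])
      else st) st)
    (PySem.List.pyRange 0 m 1) _ _ hinit
    (by
      intro i hi sA sB hR
      have hibnd := PySem.List.mem_pyRange_one.mp hi
      refine foldl_rel _ _ _ (PySem.List.pyRange 0 n 1) sA sB hR ?_
      intro j hj sA' sB' hR'
      have hjbnd := PySem.List.mem_pyRange_one.mp hj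
      exact cell_step m n picture i j ⟨hibnd.1, hibnd.2⟩ ⟨hjbnd.1, hjbnd.2⟩ sA' sB' hR')
  have hres := hfold.2.1
  simp only [kakao_friends_coloring_book, kakao_friends_coloring_book_alt]
  rw [hres]

-- ===== VERDICT (by name: the statement is the Claim_ definition above) =====
theorem kakao_friends_coloring_book_spec : Claim_equal_kakao_friends_coloring_book := by
  intro m n picture _ _
  show _ = _
  exact main_equal m n picture
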